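-- pv_equiv track=rewrite | github.com/adagio/advent-of-code | source/day05/modules/event.py | trigger_units_of
-- ===== SOURCE A (Python) =====
-- def trigger_units_of(polymer: [str]):
--
--     stack = ['#']  # a pillow
--
--     for c in polymer:
--         tail = stack[-1]
--         if tail == c.swapcase():  # if different and opposite
--             stack.pop()  # react
--         else:  # if similar
--             stack.append(c)
--
--     stack = stack[1:]  # remove pillow, at head
--
--     result = ''.join(stack)  # convert list to string
--
--     return result
-- ===== SOURCE B (Python) =====
-- def trigger_units_of(polymer: [str]):
--     # Fixed-point reduction: repeatedly scan for the first adjacent reacting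
--     # pair and delete it, until a full scan finds none.
--     units = list(polymer)
--     while True:
--         for i in range(len(units) - 1):
--             if units[i + 1] == units[i].swapcase():
--                 del units[i:i + 2]
--                 break
--         else:
--             return ''.join(units)
-- ===== Notes on version B (the rewrite author's own statement) =====
-- stated objective: alternative
-- what changed: Replaces the single sentinel-stack pass with repeated scans that delete the first adjacent reacting pair until a fixed point is reached (confluence makes the reduced polymer unique).
-- outside the precondition, e.g. on trigger_units_of(['#']): A returns '', B returns '#'; on trigger_units_of(['#', 'a']): A raises IndexError, B returns '#a'
import Mathlib
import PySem

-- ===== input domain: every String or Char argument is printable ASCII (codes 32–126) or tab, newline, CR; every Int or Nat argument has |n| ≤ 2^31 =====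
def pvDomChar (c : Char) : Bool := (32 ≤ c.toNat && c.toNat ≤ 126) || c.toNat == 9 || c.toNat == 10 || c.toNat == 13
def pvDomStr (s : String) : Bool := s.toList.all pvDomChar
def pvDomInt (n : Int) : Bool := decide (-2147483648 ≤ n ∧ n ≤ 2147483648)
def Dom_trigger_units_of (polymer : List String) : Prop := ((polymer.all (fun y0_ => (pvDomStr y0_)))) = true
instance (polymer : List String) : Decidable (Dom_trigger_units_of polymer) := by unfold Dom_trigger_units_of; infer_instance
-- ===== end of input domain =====

-- B computes the same reduced polymer by repeatedly scanning for the first adjacent reacting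
-- pair and deleting it until a fixed point, instead of A's single sentinel-stack pass.


-- hand port of Python's str.swapcase (per-char case toggle); exact on the printable-ASCII domain
def swapChar (c : Char) : Char :=
  if 97 ≤ c.toNat ∧ c.toNat ≤ 122 then Char.ofNat (c.toNat - 32)
  else if 65 ≤ c.toNat ∧ c.toNat ≤ 90 then Char.ofNat (c.toNat + 32)
  else c

def swapS (s : String) : String := String.ofList (s.toList.map swapChar)

-- ===== PORT A =====
-- one iteration of A's loop body; stack[-1] raises IndexError on an empty stack in Python
-- (unreachable under Pre_); the none branch here is arbitrary
def stepA (stack : List String) (c : String) : List String :=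
  match stack.getLast? with
  | some tail => if tail = swapS c then stack.dropLast else stack ++ [c]
  | none => stack ++ [c]

def trigger_units_of (polymer : List String) : String :=
  let stack := polymer.foldl stepA ["#"]              -- stack = ['#']; for c in polymer: …
  let stack := PySem.List.slice stack (some 1) none   -- stack = stack[1:]
  PySem.Str.join "" stack                             -- ''.join(stack)

-- ===== PORT B =====
-- the inner for-loop: scan for the first i with units[i+1] == units[i].swapcase(),
-- returning the list with that pair deleted (none = the scan found no reacting pair)
def removeFirstPair : List String → Option (List String)
  | a :: b :: rest => if b = swapS a then some rest else (removeFirstPair (b :: rest)).map (a :: ·)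
  | _ => none

-- needed by reduceLoop's termination proof
theorem removeFirstPair_length : ∀ {l u : List String}, removeFirstPair l = some u → u.length + 2 = l.length
  | a :: b :: rest, u, h => by
    by_cases hc : b = swapS a
    · simp [removeFirstPair, hc] at h; simp [← h]
    · simp only [removeFirstPair, if_neg hc, Option.map_eq_some_iff] at h
      obtain ⟨u', hu', rfl⟩ := h
      have := removeFirstPair_length hu'
      simp at this ⊢; omega

-- the while True loop: delete the first reacting pair and rescan, until none is found
def reduceLoop (units : List String) : List String :=
  match h : removeFirstPair units with
  | some u => reduceLoop u
  | none => units
termination_by units.length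
decreasing_by have := removeFirstPair_length h; omega

def trigger_units_of_alt (polymer : List String) : String :=
  PySem.Str.join "" (reduceLoop polymer)              -- ''.join(units)

-- ===== PRECONDITION & SPEC =====
-- Pre_ excludes polymers containing the sentinel string '#', on which A's pillow element can
-- react with input elements (raising IndexError, or silently swallowing a '#' as on ['#']).
def Pre_trigger_units_of (polymer : List String) : Prop := "#" ∉ polymer
instance (polymer : List String) : Decidable (Pre_trigger_units_of polymer) := by
  unfold Pre_trigger_units_of; infer_instance

def pvWitness_trigger_units_of : List String := ["d", "a", "b", "A", "c", "C", "a"]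

def Spec_trigger_units_of (polymer : List String) (out : String) : Prop := out = trigger_units_of_alt polymer
instance (polymer : List String) (out : String) : Decidable (Spec_trigger_units_of polymer out) := by unfold Spec_trigger_units_of; infer_instance

-- ===== CLAIM (what is proved, stated in full; the proofs are below) =====
def Claim_equal_trigger_units_of : Prop := ∀ (polymer : List String), Dom_trigger_units_of polymer → Pre_trigger_units_of polymer → Spec_trigger_units_of polymer (trigger_units_of polymer)

-- ===== LEMMAS AND PROOFS =====

-- the stack of A's loop viewed with its top at the HEAD of the list
def stepR (s : List String) (c : String) : List String :=
  match s with
  | t :: rest => if t = swapS c then rest else c :: t :: rest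
  | [] => [c]

def run (s l : List String) : List String := l.foldl stepR s

-- no adjacent reacting pair
def Irred (s : List String) : Prop := s.IsChain (fun x y => y ≠ swapS x)

theorem toNat_ofNat_small {n : Nat} (h : n < 55296) : (Char.ofNat n).toNat = n := by
  have hv : n.isValidChar := Or.inl h
  simp [Char.toNat_ofNat, hv]

theorem swapChar_invol (c : Char) : swapChar (swapChar c) = c := by
  unfold swapChar
  by_cases h1 : 97 ≤ c.toNat ∧ c.toNat ≤ 122
  · rw [if_pos h1]
    have ht : (Char.ofNat (c.toNat - 32)).toNat = c.toNat - 32 := toNat_ofNat_small (by omega)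
    rw [if_neg (by omega), if_pos (by omega), ht,
        show c.toNat - 32 + 32 = c.toNat from by omega, Char.ofNat_toNat]
  · rw [if_neg h1]
    by_cases h2 : 65 ≤ c.toNat ∧ c.toNat ≤ 90
    · rw [if_pos h2]
      have ht : (Char.ofNat (c.toNat + 32)).toNat = c.toNat + 32 := toNat_ofNat_small (by omega)
      rw [if_pos (by omega), ht,
          show c.toNat + 32 - 32 = c.toNat from by omega, Char.ofNat_toNat]
    · rw [if_neg h2, if_neg h1, if_neg h2]

theorem swapS_invol (s : String) : swapS (swapS s) = s := by
  unfold swapS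
  simp [List.map_map, Function.comp_def, swapChar_invol]

theorem swapS_hash {c : String} (h : c ≠ "#") : "#" ≠ swapS c := by
  intro he
  have h1 : swapS "#" = swapS (swapS c) := by rw [he]
  rw [swapS_invol] at h1
  exact h (by simpa [show swapS "#" = "#" from by decide] using h1.symm)

theorem stepA_reverse (s : List String) (c : String) :
    stepA s.reverse c = (stepR s c).reverse := by
  cases s with
  | nil => simp [stepA, stepR]
  | cons t rest =>
    simp only [stepA, stepR, List.reverse_cons, List.getLast?_concat]
    by_cases hc : t = swapS c <;> simp [hc]

theorem foldl_stepA (l : List String) : ∀ s, l.foldl stepA s.reverse = (run s l).reverse := by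
  induction l with
  | nil => intro s; simp [run]
  | cons c cs ih =>
    intro s
    simp only [run, List.foldl_cons, stepA_reverse]
    exact ih (stepR s c)

theorem run_pillow (l : List String) (hl : "#" ∉ l) :
    ∀ s, run (s ++ ["#"]) l = run s l ++ ["#"] := by
  induction l with
  | nil => intro s; simp [run]
  | cons c cs ih =>
    intro s
    have hc : c ≠ "#" := fun h => hl (by simp [h])
    have ih' := ih (fun h => hl (List.mem_cons_of_mem _ h))
    cases s with
    | nil =>
      simp only [run, List.foldl_cons, List.nil_append]
      rw [show stepR ["#"] c = [c] ++ ["#"] from by simp [stepR, if_neg (swapS_hash hc)],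
          show stepR [] c = [c] from rfl]
      exact ih' [c]
    | cons t rest =>
      simp only [run, List.foldl_cons, List.cons_append, stepR]
      by_cases h : t = swapS c
      · simp only [if_pos h]; exact ih' rest
      · simp only [if_neg h]; exact ih' (c :: t :: rest)

theorem stepR_irred {s : List String} (hs : Irred s) (c : String) : Irred (stepR s c) := by
  cases s with
  | nil => exact List.isChain_singleton c
  | cons t rest =>
    by_cases h : t = swapS c
    · simpa [stepR, h, Irred] using hs.tail
    · simp only [stepR, if_neg h]
      exact List.isChain_cons_cons.mpr ⟨h, hs⟩

theorem cancel_pair {s : List String} (hs : Irred s) (c : String) :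
    stepR (stepR s c) (swapS c) = s := by
  cases s with
  | nil => simp [stepR, swapS_invol]
  | cons t rest =>
    by_cases h : t = swapS c
    · cases rest with
      | nil => simp [stepR, h]
      | cons h2 r =>
        have hne : h2 ≠ c := by
          have := (List.isChain_cons_cons.mp hs).1
          rwa [h, swapS_invol] at this
        simp [stepR, h, swapS_invol, hne]
    · have hcc : c = swapS (swapS c) := (swapS_invol c).symm
      simp [stepR, if_neg h, ← hcc]

theorem remove_run : ∀ {l u : List String}, removeFirstPair l = some u →
    ∀ s, Irred s → run s l = run s u
  | a :: b :: rest, u, h => by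
    intro s hs
    by_cases hc : b = swapS a
    · simp only [removeFirstPair, if_pos hc, Option.some.injEq] at h
      subst h
      simp only [run, List.foldl_cons]
      rw [show stepR (stepR s a) b = s from hc ▸ cancel_pair hs a]
    · simp only [removeFirstPair, if_neg hc, Option.map_eq_some_iff] at h
      obtain ⟨u', hu', rfl⟩ := h
      simp only [run, List.foldl_cons]
      exact remove_run hu' (stepR s a) (stepR_irred hs a)

theorem none_irred : ∀ {l : List String}, removeFirstPair l = none → Irred l
  | [] , _ => List.isChain_nil
  | [a], _ => List.isChain_singleton a
  | a :: b :: rest, h => by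
    by_cases hc : b = swapS a
    · simp [removeFirstPair, hc] at h
    · simp only [removeFirstPair, if_neg hc, Option.map_eq_none_iff] at h
      exact List.isChain_cons_cons.mpr ⟨hc, none_irred h⟩

theorem run_of_irred : ∀ (l s : List String), Irred (l.reverse ++ s) → run s l = l.reverse ++ s := by
  intro l
  induction l with
  | nil => intro s _; simp [run]
  | cons c cs ih =>
    intro s hirr
    have hirr' : Irred (cs.reverse ++ (c :: s)) := by simpa using hirr
    have hstep : stepR s c = c :: s := by
      cases s with
      | nil => simp [stepR]
      | cons t rest =>
        have hsuf : (c :: t :: rest).IsChain (fun x y => y ≠ swapS x) :=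
          hirr'.suffix ⟨cs.reverse, by simp⟩
        have hne : t ≠ swapS c := (List.isChain_cons_cons.mp hsuf).1
        simp [stepR, hne]
    simp only [run, List.foldl_cons, hstep]
    simpa using ih (c :: s) hirr'

theorem reduceLoop_props : ∀ (n : Nat) (l : List String), l.length ≤ n →
    removeFirstPair (reduceLoop l) = none ∧ run [] (reduceLoop l) = run [] l := by
  intro n
  induction n with
  | zero =>
    intro l hl
    have : l = [] := List.length_eq_zero_iff.mp (Nat.le_zero.mp hl)
    subst this
    rw [reduceLoop]
    exact ⟨rfl, rfl⟩
  | succ n ih =>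
    intro l hl
    rw [reduceLoop]
    split
    · next u hu =>
      have hlen := removeFirstPair_length hu
      obtain ⟨h1, h2⟩ := ih u (by omega)
      exact ⟨h1, by rw [h2]; exact (remove_run hu [] List.isChain_nil).symm⟩
    · next h => exact ⟨h, rfl⟩

theorem irred_reverse {l : List String} (h : Irred l) : Irred l.reverse := by
  rw [Irred, List.isChain_reverse]
  exact h.imp (fun a b hab he => hab (by rw [he, swapS_invol]))

theorem reduceLoop_eq (l : List String) : reduceLoop l = (run [] l).reverse := by
  obtain ⟨h1, h2⟩ := reduceLoop_props l.length l le_rfl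
  have h3 : run [] (reduceLoop l) = (reduceLoop l).reverse := by
    simpa using run_of_irred (reduceLoop l) []
      (by simpa using irred_reverse (none_irred h1))
  rw [← h2, h3, List.reverse_reverse]

-- ===== VERDICT (by name: the statement is the Claim_ definition above) =====
theorem trigger_units_of_spec : Claim_equal_trigger_units_of := by
  intro polymer _hdom hpre
  unfold Spec_trigger_units_of trigger_units_of trigger_units_of_alt
  have h1 : polymer.foldl stepA ["#"] = (run ["#"] polymer).reverse := by
    simpa using foldl_stepA polymer ["#"]
  have h2 : run ["#"] polymer = run [] polymer ++ ["#"] := by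
    simpa using run_pillow polymer hpre []
  rw [h1, h2, reduceLoop_eq]
  simp [PySem.List.slice_from_one]
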